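-- pv_equiv track=rewrite | github.com/grapheneaffiliate/h4-polytopic-attention | solve_arc1_recovery.py | solve_08ed6ac7
-- ===== SOURCE A (Python) =====
-- def solve_08ed6ac7(grid):
--     """Columns of 5s get numbered 1,2,3,4 by length (longest=1)."""
--     rows, cols = len(grid), len(grid[0])
--     out = [row[:] for row in grid]
--     col_lengths = {}
--     for c in range(cols):
--         length = sum(1 for r in range(rows) if grid[r][c] == 5)
--         if length > 0:
--             col_lengths[c] = length
--     sorted_cols = sorted(col_lengths.keys(), key=lambda c: -col_lengths[c])
--     color = 1
--     for col in sorted_cols: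
--         for r in range(rows):
--             if grid[r][col] == 5:
--                 out[r][col] = color
--         color += 1
--     return out
-- ===== SOURCE B (Python) =====
-- def solve_08ed6ac7(grid):
--     """Columns of 5s get numbered 1,2,3,4 by length (longest=1)."""
--     rows, width = len(grid), len(grid[0])
--     # one row-major pass filling a flat per-column counter array
--     cnt = [0] * width
--     for row in grid:
--         for c in range(width):
--             if row[c] == 5:
--                 cnt[c] += 1
--     # counting sort: bucket the columns by their 5-count (no comparison sort)
--     buckets = [[] for _ in range(rows + 1)]
--     for c in range(width):
--         buckets[cnt[c]].append(c)
--     # hand out colors by descending count; ties come out in ascending column order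
--     color = {}
--     nc = 1
--     for length in reversed(range(1, rows + 1)):
--         for c in buckets[length]:
--             color[c] = nc
--             nc += 1
--     # one whole-grid sweep driven by the precomputed column -> color table
--     return [[color[c] if v == 5 and c in color else v
--              for c, v in enumerate(row)] for row in grid]
-- ===== Notes on version B (the rewrite author's own statement) =====
-- stated objective: alternative
-- what changed: Replaces A's comparison sort of the 5-bearing columns and its per-selected-column repaint loops by a counting sort: a flat per-column counter array filled in one row-major pass, buckets indexed by 5-count, colors handed out by walking the counts from rows down to 1, then one table-driven sweep over the whole grid.
import Mathlib
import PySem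

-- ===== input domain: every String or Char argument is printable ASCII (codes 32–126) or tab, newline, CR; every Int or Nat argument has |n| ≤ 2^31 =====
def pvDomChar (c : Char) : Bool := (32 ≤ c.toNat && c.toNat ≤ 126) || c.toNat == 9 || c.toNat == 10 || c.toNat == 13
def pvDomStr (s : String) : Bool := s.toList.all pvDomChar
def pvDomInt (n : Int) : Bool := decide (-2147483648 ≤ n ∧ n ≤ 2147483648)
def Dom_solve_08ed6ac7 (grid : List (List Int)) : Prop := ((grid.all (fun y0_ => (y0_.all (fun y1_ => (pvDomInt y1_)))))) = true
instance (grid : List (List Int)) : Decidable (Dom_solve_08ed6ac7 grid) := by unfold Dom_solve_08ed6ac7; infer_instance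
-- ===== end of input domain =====

-- B replaces A's comparison sort of the 5-bearing columns and its per-selected-column repaint
-- loops by a counting sort (a flat per-column counter array, buckets indexed by 5-count, colors
-- handed out from count rows down to 1) followed by one table-driven sweep over the grid
-- (alternative decomposition). Equivalence is about return values; A's copying of rows has no
-- observable counterpart here.

-- ===== PORT A =====
def solve_08ed6ac7 (grid : List (List Int)) : List (List Int) :=
  let rows : Int := grid.length
  let cols : Int := (PySem.List.pyGetD grid 0 []).length
  let out : List (List Int) := grid.map (fun row => PySem.List.slice row none none)
  let colLengths : PySem.Dict Int Int :=
    (PySem.List.pyRange 0 cols 1).foldl (fun d c =>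
      let length : Int := (((PySem.List.pyRange 0 rows 1).filter
          (fun r => PySem.List.pyGetD (PySem.List.pyGetD grid r []) c 0 == 5)).map
            (fun _ => (1 : Int))).sum
      if length > 0 then d.insert c length else d) PySem.Dict.empty
  let sortedCols : List Int :=
    PySem.List.sorted colLengths.keys (fun c => -(colLengths.getD c 0)) false
  (sortedCols.foldl (fun (oc : List (List Int) × Int) col =>
      ((PySem.List.pyRange 0 rows 1).foldl (fun o r =>
          if PySem.List.pyGetD (PySem.List.pyGetD grid r []) col 0 == 5 then
            PySem.List.pySetD o r (PySem.List.pySetD (PySem.List.pyGetD o r []) col oc.2)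
          else o) oc.1,
       oc.2 + 1)) (out, 1)).1

-- ===== PORT B =====
def solve_08ed6ac7_alt (grid : List (List Int)) : List (List Int) :=
  let rows : Int := grid.length
  let width : Int := (PySem.List.pyGetD grid 0 []).length
  let cnt : List Int :=
    grid.foldl (fun cnt row =>
      (PySem.List.pyRange 0 width 1).foldl (fun cnt c =>
        if PySem.List.pyGetD row c 0 == 5 then
          PySem.List.pySetD cnt c (PySem.List.pyGetD cnt c 0 + 1)
        else cnt) cnt) (List.replicate width.toNat 0)
  let buckets : List (List Int) :=
    (PySem.List.pyRange 0 width 1).foldl (fun b c =>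
      PySem.List.pySetD b (PySem.List.pyGetD cnt c 0)
        (PySem.List.pyGetD b (PySem.List.pyGetD cnt c 0) [] ++ [c]))
      (List.replicate (rows + 1).toNat [])
  let color : PySem.Dict Int Int :=
    ((PySem.List.pyRange 1 (rows + 1) 1).reverse.foldl
      (fun (dn : PySem.Dict Int Int × Int) L =>
        (PySem.List.pyGetD buckets L []).foldl
          (fun (dn : PySem.Dict Int Int × Int) c => (dn.1.insert c dn.2, dn.2 + 1)) dn)
      (PySem.Dict.empty, 1)).1
  grid.map (fun row =>
    (PySem.List.enumerate row 0).map (fun p =>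
      if p.2 == 5 && color.contains p.1 then color.getD p.1 0 else p.2))

-- ===== PRECONDITION & SPEC =====
-- Pre_: exactly the inputs where Python A returns: a non-empty grid in which no row is
-- shorter than the first row (A indexes grid[0] and grid[r][c] for c < len(grid[0])).
def Pre_solve_08ed6ac7 (grid : List (List Int)) : Prop :=
  grid ≠ [] ∧ ∀ row ∈ grid, (grid.getD 0 []).length ≤ row.length
instance (grid : List (List Int)) : Decidable (Pre_solve_08ed6ac7 grid) := by
  unfold Pre_solve_08ed6ac7; infer_instance
def pvWitness_solve_08ed6ac7 : List (List Int) := [[5, 0, 5], [5, 5, 0], [0, 5, 0]]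

def Spec_solve_08ed6ac7 (grid : List (List Int)) (out : List (List Int)) : Prop :=
  out = solve_08ed6ac7_alt grid
instance (grid : List (List Int)) (out : List (List Int)) : Decidable (Spec_solve_08ed6ac7 grid out) := by
  unfold Spec_solve_08ed6ac7; infer_instance

-- ===== CLAIM (what is proved, stated in full; the proofs are below) =====
def Claim_equal_solve_08ed6ac7 : Prop := ∀ (grid : List (List Int)), Dom_solve_08ed6ac7 grid → Pre_solve_08ed6ac7 grid → Spec_solve_08ed6ac7 grid (solve_08ed6ac7 grid)


-- ===== LEMMAS AND PROOFS =====

def pvW (grid : List (List Int)) : Nat := (PySem.List.pyGetD grid 0 []).length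

def pvCnt (grid : List (List Int)) (c : Int) : Int :=
  ((grid.filter (fun row => PySem.List.pyGetD row c 0 == 5)).length : Int)

theorem pv_lenExpr (grid : List (List Int)) (c : Int) :
    (((PySem.List.pyRange 0 (grid.length : Int) 1).filter
        (fun r => PySem.List.pyGetD (PySem.List.pyGetD grid r []) c 0 == 5)).map
          (fun _ => (1 : Int))).sum = pvCnt grid c := by
  have h1 : ∀ (l : List Int), (l.map (fun _ => (1 : Int))).sum = (l.length : Int) := by
    intro l; induction l with
    | nil => simp
    | cons x t ih => simp; omega
  rw [h1, pvCnt]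
  congr 1
  have h2 := List.filter_map
    (f := fun j => PySem.List.pyGetD grid j ([] : List Int))
    (p := fun row => PySem.List.pyGetD row c 0 == 5)
    (l := PySem.List.pyRange 0 (grid.length : Int) 1)
  rw [PySem.List.map_pyGetD_pyRange_zero'] at h2
  rw [h2, List.length_map]
  rfl

theorem pv_insertBy_congr {a : Type} (b1 b2 : a -> a -> Bool) (x : a) (l : List a)
    (h : ∀ y ∈ l, b1 x y = b2 x y) : PySem.List.insertBy b1 x l = PySem.List.insertBy b2 x l := by
  induction l with
  | nil => rfl
  | cons z t ih =>
    have hz : b1 x z = b2 x z := h z (by simp)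
    simp only [PySem.List.insertBy]
    rw [← hz]
    by_cases hb : b1 x z = true
    · simp [hb]
    · simp only [Bool.not_eq_true] at hb
      simp [hb]
      exact ih (fun y hy => h y (by simp [hy]))

-- fold-level congruence of insertion sorts whose comparators agree on every pair
-- (new element, already-processed element)
theorem pv_insertBy_fold_congr (b1 b2 : Int -> Int -> Bool) :
    ∀ (xs acc : List Int), (∀ x ∈ xs, ∀ y ∈ acc, b1 x y = b2 x y) →
    xs.Pairwise (fun y x => b1 x y = b2 x y) →
    xs.foldl (fun a x => PySem.List.insertBy b1 x a) acc
      = xs.foldl (fun a x => PySem.List.insertBy b2 x a) acc := by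
  intro xs
  induction xs with
  | nil => intro acc _ _; rfl
  | cons z t ih =>
    intro acc hacc hpw
    simp only [List.foldl_cons]
    have h1 : PySem.List.insertBy b1 z acc = PySem.List.insertBy b2 z acc :=
      pv_insertBy_congr _ _ _ _ (fun y hy => hacc z (by simp) y hy)
    rw [h1]
    refine ih _ ?_ (List.Pairwise.sublist (List.sublist_cons_self z t) hpw)
    intro x hx y hy
    rcases (PySem.List.mem_insertBy b2 z y acc).1 hy with h | h
    · subst h
      exact (List.pairwise_cons.1 hpw).1 x hx
    · exact hacc x (by simp [hx]) y h

theorem pv_sorted_aux {a k : Type} [LT k] [DecidableLT k] (k1 k2 : a -> k)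
    (b1 b2 : a -> a -> Bool)
    (hb : ∀ x y, k1 x = k2 x → k1 y = k2 y → b1 x y = b2 x y) :
    ∀ (xs acc : List a), (∀ x ∈ xs, k1 x = k2 x) → (∀ x ∈ acc, k1 x = k2 x) →
    xs.foldl (fun acc x => PySem.List.insertBy b1 x acc) acc
      = xs.foldl (fun acc x => PySem.List.insertBy b2 x acc) acc := by
  intro xs
  induction xs with
  | nil => intro acc _ _; rfl
  | cons z t ih =>
    intro acc hxs hacc
    simp only [List.foldl_cons]
    have h1 : PySem.List.insertBy b1 z acc = PySem.List.insertBy b2 z acc :=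
      pv_insertBy_congr _ _ _ _ (fun y hy => hb z y (hxs z (by simp)) (hacc y hy))
    rw [h1]
    exact ih _ (fun x hx => hxs x (by simp [hx]))
      (fun x hx => by
        rcases (PySem.List.mem_insertBy b2 z x acc).1 hx with h | h
        · subst h; exact hxs x (by simp)
        · exact hacc x h)

theorem pv_sorted_congr {a k : Type} [LT k] [DecidableLT k] (xs : List a) (k1 k2 : a -> k)
    (rev : Bool) (h : ∀ x ∈ xs, k1 x = k2 x) :
    PySem.List.sorted xs k1 rev = PySem.List.sorted xs k2 rev := by
  unfold PySem.List.sorted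
  cases rev
  · simp only [Bool.false_eq_true, if_false]
    exact pv_sorted_aux k1 k2 _ _ (fun x y hx hy => by rw [hx, hy]) xs [] h (by simp)
  · simp only [if_true]
    exact pv_sorted_aux k1 k2 _ _ (fun x y hx hy => by rw [hx, hy]) xs [] h (by simp)

theorem pv_dictA_items (f : Int -> Int) : ∀ (CL : List Int) (d : PySem.Dict Int Int), CL.Nodup →
    (∀ c ∈ CL, d.contains c = false) →
    (CL.foldl (fun d c => if f c > 0 then d.insert c (f c) else d) d).items
      = d.items ++ (CL.filter (fun c => decide (f c > 0))).map (fun c => (c, f c)) := by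
  intro CL
  induction CL with
  | nil => intro d _ _; simp
  | cons c0 t ih =>
    intro d hnd hfresh
    simp only [List.foldl_cons, List.filter_cons]
    by_cases hp : f c0 > 0
    · rw [if_pos hp]
      have hfresh0 : d.contains c0 = false := hfresh c0 (by simp)
      have hrest : ∀ c ∈ t, (d.insert c0 (f c0)).contains c = false := by
        intro c hc
        rw [PySem.Dict.contains_insert]
        have hne : c ≠ c0 := by
          intro he; subst he; exact (List.nodup_cons.1 hnd).1 hc
        simp [hne, hfresh c (by simp [hc])]
      rw [ih _ (List.nodup_cons.1 hnd).2 hrest,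
          PySem.Dict.items_insert_of_not_contains _ _ hfresh0]
      simp [hp]
    · rw [if_neg hp, ih _ (List.nodup_cons.1 hnd).2 (fun c hc => hfresh c (by simp [hc]))]
      simp [hp]

theorem pv_cm_skip (xs : List Int) : ∀ (s : Int) (d : PySem.Dict Int Int) (c : Int), c ∉ xs →
    ((PySem.List.enumerate xs s).foldl (fun d p => d.insert p.2 (p.1 + 1)) d).get? c = d.get? c := by
  induction xs with
  | nil => intro s d c _; simp [PySem.List.enumerate]
  | cons x t ih =>
    intro s d c hc
    rw [PySem.List.enumerate_cons]
    simp only [List.foldl_cons]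
    rw [ih (s + 1) _ c (fun h => hc (by simp [h]))]
    exact PySem.Dict.get?_insert_of_ne _ _ (fun h => hc (by simp [h]))

theorem pv_cm_get? (xs : List Int) : ∀ (s : Int) (d : PySem.Dict Int Int) (c : Int),
    xs.Nodup → c ∈ xs →
    ((PySem.List.enumerate xs s).foldl (fun d p => d.insert p.2 (p.1 + 1)) d).get? c
      = some (s + (xs.idxOf c : Int) + 1) := by
  induction xs with
  | nil => intro s d c _ h; simp at h
  | cons x t ih =>
    intro s d c hnd hc
    rw [PySem.List.enumerate_cons]
    simp only [List.foldl_cons]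
    by_cases hcx : c = x
    · subst hcx
      rw [pv_cm_skip t (s + 1) _ c (List.nodup_cons.1 hnd).1,
          PySem.Dict.get?_insert_self]
      simp [List.idxOf_cons_self]
    · have hct : c ∈ t := by
        rcases List.mem_cons.1 hc with h | h
        · exact absurd h hcx
        · exact h
      rw [ih (s + 1) _ c (List.nodup_cons.1 hnd).2 hct]
      have hxc : (x == c) = false := by
        simp only [beq_eq_false_iff_ne, ne_eq]
        exact fun h => hcx h.symm
      have hidx : ((x :: t).idxOf c : Int) = (t.idxOf c : Int) + 1 := by
        rw [List.idxOf_cons, hxc]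
        simp
      rw [hidx]
      congr 1
      omega

def pvCell (grid : List (List Int)) (r c : Int) : Int :=
  PySem.List.pyGetD (PySem.List.pyGetD grid r []) c 0

theorem pv_inner_aux (grid : List (List Int)) (col color : Int) :
    ∀ (n a : Nat) (out : List (List Int)), grid.length - a = n → out.length = grid.length →
    (PySem.List.pyRange (a : Int) (grid.length : Int) 1).foldl
        (fun o r => if PySem.List.pyGetD (PySem.List.pyGetD grid r []) col 0 == 5 then
            PySem.List.pySetD o r (PySem.List.pySetD (PySem.List.pyGetD o r []) col color)
          else o) out
      = out.mapIdx (fun r row =>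
          if a ≤ r ∧ pvCell grid (r : Int) col = 5 then PySem.List.pySetD row col color else row) := by
  intro n
  induction n with
  | zero =>
    intro a out ha hlen
    rw [PySem.List.pyRange_one_eq_nil (by omega)]
    simp only [List.foldl_nil]
    apply List.ext_getElem (by simp)
    intro r h1 h2
    rw [List.getElem_mapIdx]
    rw [if_neg (by omega)]
  | succ m ih =>
    intro a out ha hlen
    rw [PySem.List.pyRange_one_cons (by omega)]
    simp only [List.foldl_cons]
    have hcast : (a : Int) + 1 = ((a + 1 : Nat) : Int) := by push_cast; ring
    by_cases hc : PySem.List.pyGetD (PySem.List.pyGetD grid (a : Int) []) col 0 == 5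
    · rw [if_pos hc]
      have hget : PySem.List.pyGetD out (a : Int) [] = out[a]'(by omega) := by
        rw [PySem.List.pyGetD_natCast]
        exact List.getD_eq_getElem _ _ (by omega)
      set nr := PySem.List.pySetD (PySem.List.pyGetD out (a : Int) []) col color with hnr
      have hset : PySem.List.pySetD out (a : Int) nr = out.set a nr :=
        PySem.List.pySetD_natCast out a nr
      rw [hset, hcast, ih (a + 1) _ (by omega) (by simp [hlen])]
      apply List.ext_getElem (by simp)
      intro r h1 h2
      rw [List.getElem_mapIdx, List.getElem_mapIdx]
      have hsetlen : (out.set a nr).length = out.length := by simp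
      by_cases hra : r = a
      · subst hra
        rw [List.getElem_set_self (by omega)]
        rw [if_neg (by omega)]
        have hC : pvCell grid (r : Int) col = 5 := by
          rw [pvCell]; exact beq_iff_eq.1 hc
        rw [if_pos ⟨by omega, hC⟩, hnr, hget]
      · rw [List.getElem_set_ne (by omega)]
        by_cases hC : pvCell grid (r : Int) col = 5
        · by_cases har : a ≤ r
          · rw [if_pos ⟨by omega, hC⟩, if_pos ⟨har, hC⟩]
          · rw [if_neg (by omega), if_neg (by tauto)]
        · rw [if_neg (by tauto), if_neg (by tauto)]
    · rw [if_neg hc]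
      rw [hcast, ih (a + 1) _ (by omega) hlen]
      apply List.ext_getElem (by simp)
      intro r h1 h2
      rw [List.getElem_mapIdx, List.getElem_mapIdx]
      have hC : ¬ pvCell grid (r : Int) col = 5 ∨ r ≠ a := by
        by_cases hra : r = a
        · subst hra
          left
          rw [pvCell]
          exact fun h => hc (beq_iff_eq.2 h)
        · right; exact hra
      by_cases hCr : pvCell grid (r : Int) col = 5
      · by_cases har : a ≤ r
        · have hra : r ≠ a := by tauto
          rw [if_pos ⟨by omega, hCr⟩, if_pos ⟨by omega, hCr⟩]
        · rw [if_neg (by omega), if_neg (by omega)]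
      · rw [if_neg (by tauto), if_neg (by tauto)]

theorem pv_inner (grid : List (List Int)) (col color : Int) (out : List (List Int))
    (h : out.length = grid.length) :
    (PySem.List.pyRange 0 (grid.length : Int) 1).foldl
        (fun o r => if PySem.List.pyGetD (PySem.List.pyGetD grid r []) col 0 == 5 then
            PySem.List.pySetD o r (PySem.List.pySetD (PySem.List.pyGetD o r []) col color)
          else o) out
      = out.mapIdx (fun r row =>
          if pvCell grid (r : Int) col = 5 then PySem.List.pySetD row col color else row) := by
  have := pv_inner_aux grid col color grid.length 0 out (by omega) h
  rw [show ((0 : Nat) : Int) = (0 : Int) from rfl] at this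
  rw [this]
  apply List.ext_getElem (by simp)
  intro r h1 h2
  rw [List.getElem_mapIdx, List.getElem_mapIdx]
  by_cases hC : pvCell grid (r : Int) col = 5
  · rw [if_pos ⟨by omega, hC⟩, if_pos hC]
  · rw [if_neg (by tauto), if_neg hC]

theorem pv_paint (grid : List (List Int)) : ∀ (L : List Int), L.Nodup → (∀ x ∈ L, 0 ≤ x) →
    ∀ (k : Int) (out : List (List Int)), out.length = grid.length →
    (L.foldl (fun (oc : List (List Int) × Int) col =>
        ((PySem.List.pyRange 0 (grid.length : Int) 1).foldl
            (fun o r => if PySem.List.pyGetD (PySem.List.pyGetD grid r []) col 0 == 5 then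
                PySem.List.pySetD o r (PySem.List.pySetD (PySem.List.pyGetD o r []) col oc.2)
              else o) oc.1,
         oc.2 + 1)) (out, k)).1
      = out.mapIdx (fun r row => row.mapIdx (fun c v =>
          if pvCell grid (r : Int) (c : Int) = 5 ∧ (c : Int) ∈ L
          then k + (L.idxOf (c : Int) : Int) else v)) := by
  intro L
  induction L with
  | nil =>
    intro _ _ k out hlen
    simp only [List.foldl_nil]
    apply List.ext_getElem (by simp)
    intro r h1 h2
    rw [List.getElem_mapIdx]
    apply List.ext_getElem (by simp)
    intro c h3 h4
    rw [List.getElem_mapIdx]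
    rw [if_neg (by simp)]
  | cons col L' ih =>
    intro hnd hpos k out hlen
    simp only [List.foldl_cons]
    rw [pv_inner grid col k out hlen]
    rw [ih (List.nodup_cons.1 hnd).2 (fun x hx => hpos x (by simp [hx])) (k + 1)
        (out.mapIdx (fun r row =>
          if pvCell grid (r : Int) col = 5 then PySem.List.pySetD row col k else row))
        (by simp [hlen])]
    have hcolpos : (0 : Int) ≤ col := hpos col (by simp)
    have hcolnot : col ∉ L' := (List.nodup_cons.1 hnd).1
    apply List.ext_getElem (by simp)
    intro r h1 h2
    simp only [List.getElem_mapIdx]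
    by_cases hC : pvCell grid (r : Int) col = 5
    · rw [if_pos hC]
      rw [PySem.List.pySetD_of_nonneg _ _ hcolpos]
      apply List.ext_getElem (by simp)
      intro c h3 h4
      simp only [List.getElem_mapIdx]
      have hrlen : r < out.length := by
        have := h1; simpa using this
      by_cases hcc : (c : Int) = col
      · have hcn : col.toNat = c := by omega
        rw [List.getElem_set]
        rw [if_pos hcn]
        rw [if_neg (show ¬(pvCell grid (r : Int) (c : Int) = 5 ∧ (c : Int) ∈ L') from by
          rw [hcc]; exact fun h => hcolnot h.2)]
        rw [if_pos (show pvCell grid (r : Int) (c : Int) = 5 ∧ (c : Int) ∈ col :: L' from by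
          rw [hcc]; exact ⟨hC, by simp⟩)]
        rw [hcc, List.idxOf_cons_self]
        simp
      · rw [List.getElem_set, if_neg (show ¬(col.toNat = c) from by omega)]
        by_cases hC2 : pvCell grid (r : Int) (c : Int) = 5
        · by_cases hm : (c : Int) ∈ L'
          · rw [if_pos ⟨hC2, hm⟩, if_pos ⟨hC2, List.mem_cons.2 (Or.inr hm)⟩]
            have hbe : (col == (c : Int)) = false := by
              simp only [beq_eq_false_iff_ne, ne_eq]
              exact fun h => hcc h.symm
            rw [List.idxOf_cons, hbe]
            simp
            ring
          · rw [if_neg (show ¬(pvCell grid (r : Int) (c : Int) = 5 ∧ (c : Int) ∈ L') from by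
                tauto),
              if_neg (show ¬(pvCell grid (r : Int) (c : Int) = 5 ∧ (c : Int) ∈ col :: L') from by
                simp only [List.mem_cons]; tauto)]
        · rw [if_neg (show ¬(pvCell grid (r : Int) (c : Int) = 5 ∧ (c : Int) ∈ L') from by tauto),
            if_neg (show ¬(pvCell grid (r : Int) (c : Int) = 5 ∧ (c : Int) ∈ col :: L') from by
              tauto)]
    · rw [if_neg hC]
      apply List.ext_getElem (by simp)
      intro c h3 h4
      simp only [List.getElem_mapIdx]
      by_cases hcc : (c : Int) = col
      · rw [if_neg (show ¬(pvCell grid (r : Int) (c : Int) = 5 ∧ (c : Int) ∈ L') from by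
            rw [hcc]; exact fun h => hcolnot h.2),
          if_neg (show ¬(pvCell grid (r : Int) (c : Int) = 5 ∧ (c : Int) ∈ col :: L') from by
            rw [hcc]; exact fun h => hC h.1)]
      · by_cases hC2 : pvCell grid (r : Int) (c : Int) = 5
        · by_cases hm : (c : Int) ∈ L'
          · rw [if_pos ⟨hC2, hm⟩, if_pos ⟨hC2, List.mem_cons.2 (Or.inr hm)⟩]
            have hbe : (col == (c : Int)) = false := by
              simp only [beq_eq_false_iff_ne, ne_eq]
              exact fun h => hcc h.symm
            rw [List.idxOf_cons, hbe]
            simp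
            ring
          · rw [if_neg (show ¬(pvCell grid (r : Int) (c : Int) = 5 ∧ (c : Int) ∈ L') from by
                tauto),
              if_neg (show ¬(pvCell grid (r : Int) (c : Int) = 5 ∧ (c : Int) ∈ col :: L') from by
                simp only [List.mem_cons]; tauto)]
        · rw [if_neg (show ¬(pvCell grid (r : Int) (c : Int) = 5 ∧ (c : Int) ∈ L') from by tauto),
            if_neg (show ¬(pvCell grid (r : Int) (c : Int) = 5 ∧ (c : Int) ∈ col :: L') from by
              tauto)]

def pvKA (grid : List (List Int)) : List Int :=
  (PySem.List.pyRange 0 (pvW grid : Int) 1).filter (fun c => decide (pvCnt grid c > 0))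

def pvL (grid : List (List Int)) : List Int :=
  PySem.List.sorted (pvKA grid) (fun c => -(pvCnt grid c)) false

def pvOut (grid : List (List Int)) : List (List Int) :=
  grid.mapIdx (fun r row => row.mapIdx (fun c v =>
    if pvCell grid (r : Int) (c : Int) = 5 ∧ (c : Int) ∈ pvL grid
    then 1 + ((pvL grid).idxOf (c : Int) : Int) else v))

theorem pv_KA_nodup (grid : List (List Int)) : (pvKA grid).Nodup :=
  List.Nodup.filter _ (PySem.List.nodup_pyRange_one _ _)

theorem pv_L_nodup (grid : List (List Int)) : (pvL grid).Nodup := by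
  unfold pvL
  exact (PySem.List.sorted_perm _ _ _).symm.nodup (pv_KA_nodup grid)

theorem pv_KA_mem (grid : List (List Int)) (c : Int) :
    c ∈ pvKA grid ↔ (0 ≤ c ∧ c < (pvW grid : Int) ∧ 0 < pvCnt grid c) := by
  rw [pvKA, List.mem_filter, PySem.List.mem_pyRange_one]
  simp only [decide_eq_true_eq, gt_iff_lt]
  tauto

theorem pv_L_mem (grid : List (List Int)) (c : Int) : c ∈ pvL grid ↔ c ∈ pvKA grid :=
  PySem.List.mem_sorted _ _ _ _

theorem pv_L_pos (grid : List (List Int)) : ∀ x ∈ pvL grid, 0 ≤ x := by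
  intro x hx
  exact ((pv_KA_mem grid x).1 ((pv_L_mem grid x).1 hx)).1

theorem pv_A_eq (grid : List (List Int)) : solve_08ed6ac7 grid = pvOut grid := by
  simp only [solve_08ed6ac7]
  have hdfun : (fun (d : PySem.Dict Int Int) (c : Int) =>
      if (List.map (fun _ => (1 : Int))
            (List.filter (fun r => PySem.List.pyGetD (PySem.List.pyGetD grid r []) c 0 == 5)
              (PySem.List.pyRange 0 (grid.length : Int) 1))).sum > 0 then
        d.insert c
          (List.map (fun _ => (1 : Int))
              (List.filter (fun r => PySem.List.pyGetD (PySem.List.pyGetD grid r []) c 0 == 5)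
                (PySem.List.pyRange 0 (grid.length : Int) 1))).sum
      else d)
      = (fun (d : PySem.Dict Int Int) (c : Int) =>
          if pvCnt grid c > 0 then d.insert c (pvCnt grid c) else d) := by
    funext d c
    rw [pv_lenExpr]
  rw [hdfun]
  have hfresh : ∀ c ∈ PySem.List.pyRange 0 ((PySem.List.pyGetD grid 0 []).length : Int) 1,
      (PySem.Dict.empty : PySem.Dict Int Int).contains c = false := by
    intro c _
    exact PySem.Dict.contains_empty c
  have hit := pv_dictA_items (pvCnt grid)
    (PySem.List.pyRange 0 ((PySem.List.pyGetD grid 0 []).length : Int) 1)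
    PySem.Dict.empty (PySem.List.nodup_pyRange_one _ _) hfresh
  have hkeys : (List.foldl
      (fun (d : PySem.Dict Int Int) (c : Int) =>
        if pvCnt grid c > 0 then d.insert c (pvCnt grid c) else d)
      PySem.Dict.empty
      (PySem.List.pyRange 0 ((PySem.List.pyGetD grid 0 []).length : Int) 1)).keys
      = pvKA grid := by
    simp only [PySem.Dict.keys, hit]
    rw [pvKA, pvW]
    simp [List.map_map, show (PySem.Dict.empty : PySem.Dict Int Int).items = [] from rfl]
    exact List.map_id' _
  have hgetD : ∀ c ∈ pvKA grid, (List.foldl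
      (fun (d : PySem.Dict Int Int) (c : Int) =>
        if pvCnt grid c > 0 then d.insert c (pvCnt grid c) else d)
      PySem.Dict.empty
      (PySem.List.pyRange 0 ((PySem.List.pyGetD grid 0 []).length : Int) 1)).getD c 0
      = pvCnt grid c := by
    intro c hc
    apply PySem.Dict.getD_of_mem_items
    · rw [hit]
      simp only [List.mem_append, List.mem_map]
      right
      exact ⟨c, by rw [pvKA, pvW] at hc; simpa using hc, rfl⟩
    · rw [hkeys]
      exact pv_KA_nodup grid
  rw [hkeys]
  have hsorted : PySem.List.sorted (pvKA grid)
      (fun c => -((List.foldl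
        (fun (d : PySem.Dict Int Int) (c : Int) =>
          if pvCnt grid c > 0 then d.insert c (pvCnt grid c) else d)
        PySem.Dict.empty
        (PySem.List.pyRange 0 ((PySem.List.pyGetD grid 0 []).length : Int) 1)).getD c 0)) false
      = pvL grid := by
    rw [pvL]
    apply pv_sorted_congr
    intro c hc
    rw [hgetD c hc]
  rw [hsorted]
  have hout : List.map (fun (row : List Int) => PySem.List.slice row) grid = grid := by
    simp [PySem.List.slice_none_none]
  rw [hout]
  rw [pv_paint grid (pvL grid) (pv_L_nodup grid) (pv_L_pos grid) 1 grid rfl]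
  rfl

-- ---- B-side: counting sort ----

-- the counting-sort output order: buckets of columns by 5-count, walked from count R down to 1
def pvOrd (grid : List (List Int)) : List Int :=
  ((PySem.List.pyRange 1 ((grid.length : Int) + 1) 1).reverse).flatMap
    (fun L => (PySem.List.pyRange 0 (pvW grid : Int) 1).filter (fun c => decide (pvCnt grid c = L)))

theorem pv_key2_lt (a b x y W : Int) (hab : a < b) (hx0 : 0 ≤ x) (hxW : x < W) (hy0 : 0 ≤ y) :
    a * W + x < b * W + y := by nlinarith

theorem pv_key2_iff (a b x y W : Int) (h : y < x) (hx0 : 0 ≤ x) (hxW : x < W) (hy0 : 0 ≤ y) :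
    (a < b) ↔ (a * W + x < b * W + y) := by
  constructor
  · intro hab; exact pv_key2_lt a b x y W hab hx0 hxW hy0
  · intro hk
    by_contra hno
    rcases lt_or_eq_of_le (le_of_not_gt hno) with hba | hba
    · have := pv_key2_lt b a y x W hba hy0 (by linarith) hx0
      linarith
    · subst hba; linarith

theorem pv_cnt_nonneg (grid : List (List Int)) (c : Int) : 0 ≤ pvCnt grid c := by
  rw [pvCnt]; positivity

theorem pv_cnt_le (grid : List (List Int)) (c : Int) : pvCnt grid c ≤ (grid.length : Int) := by
  rw [pvCnt]; exact_mod_cast List.length_filter_le _ _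

theorem pv_cnt_row (row : List Int) : ∀ (w : Nat) (acc : List Int), w ≤ acc.length →
    (((PySem.List.pyRange 0 (w : Int) 1).foldl (fun cnt c =>
        if PySem.List.pyGetD row c 0 == 5 then
          PySem.List.pySetD cnt c (PySem.List.pyGetD cnt c 0 + 1) else cnt) acc).length
      = acc.length)
    ∧ ∀ j : Nat, PySem.List.pyGetD ((PySem.List.pyRange 0 (w : Int) 1).foldl (fun cnt c =>
        if PySem.List.pyGetD row c 0 == 5 then
          PySem.List.pySetD cnt c (PySem.List.pyGetD cnt c 0 + 1) else cnt) acc) (j : Int) 0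
      = PySem.List.pyGetD acc (j : Int) 0
        + (if j < w ∧ PySem.List.pyGetD row (j : Int) 0 = 5 then 1 else 0) := by
  intro w
  induction w with
  | zero =>
    intro acc hw
    rw [show ((0 : Nat) : Int) = (0 : Int) from rfl, PySem.List.pyRange_one_eq_nil (by omega)]
    simp only [List.foldl_nil]
    refine ⟨by simp, fun j => ?_⟩
    rw [if_neg (by omega)]
    ring
  | succ m ih =>
    intro acc hw
    have hcast : ((m + 1 : Nat) : Int) = (m : Int) + 1 := by push_cast; ring
    rw [hcast, PySem.List.pyRange_one_succ_right (by positivity), List.foldl_append]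
    obtain ⟨ihlen, ihget⟩ := ih acc (by omega)
    set F := (PySem.List.pyRange 0 (m : Int) 1).foldl (fun cnt c =>
        if PySem.List.pyGetD row c 0 == 5 then
          PySem.List.pySetD cnt c (PySem.List.pyGetD cnt c 0 + 1) else cnt) acc with hF
    simp only [List.foldl_cons, List.foldl_nil]
    by_cases hc : PySem.List.pyGetD row (m : Int) 0 == 5
    · rw [if_pos hc]
      have h5 : PySem.List.pyGetD row (m : Int) 0 = 5 := beq_iff_eq.1 hc
      refine ⟨by rw [PySem.List.length_pySetD]; exact ihlen, fun j => ?_⟩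
      rw [PySem.List.pyGetD_pySetD_natCast F m j _ _ (by omega)]
      by_cases hj : j = m
      · subst hj
        rw [if_pos rfl, ihget j, if_neg (by omega), if_pos ⟨by omega, h5⟩]
        ring
      · rw [if_neg hj, ihget j]
        by_cases hjm : j < m ∧ PySem.List.pyGetD row (j : Int) 0 = 5
        · rw [if_pos hjm, if_pos ⟨by omega, hjm.2⟩]
        · rw [if_neg hjm, if_neg (by
            rintro ⟨h1, h2⟩
            exact hjm ⟨by omega, h2⟩)]
    · rw [if_neg hc]
      refine ⟨ihlen, fun j => ?_⟩
      rw [ihget j]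
      have h5 : ¬ PySem.List.pyGetD row (m : Int) 0 = 5 := by
        intro h; exact hc (beq_iff_eq.2 h)
      by_cases hjm : j < m ∧ PySem.List.pyGetD row (j : Int) 0 = 5
      · rw [if_pos hjm, if_pos ⟨by omega, hjm.2⟩]
      · rw [if_neg hjm, if_neg (by
          rintro ⟨h1, h2⟩
          by_cases hj : j = m
          · subst hj; exact h5 h2
          · exact hjm ⟨by omega, h2⟩)]

theorem pv_cnt_fold (w : Nat) : ∀ (rs : List (List Int)) (acc : List Int), acc.length = w →
    ((rs.foldl (fun cnt row => (PySem.List.pyRange 0 (w : Int) 1).foldl (fun cnt c =>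
        if PySem.List.pyGetD row c 0 == 5 then
          PySem.List.pySetD cnt c (PySem.List.pyGetD cnt c 0 + 1) else cnt) cnt) acc).length = w)
    ∧ ∀ j : Nat, j < w →
      PySem.List.pyGetD (rs.foldl (fun cnt row => (PySem.List.pyRange 0 (w : Int) 1).foldl (fun cnt c =>
        if PySem.List.pyGetD row c 0 == 5 then
          PySem.List.pySetD cnt c (PySem.List.pyGetD cnt c 0 + 1) else cnt) cnt) acc) (j : Int) 0
      = PySem.List.pyGetD acc (j : Int) 0
        + ((rs.filter (fun row => PySem.List.pyGetD row (j : Int) 0 == 5)).length : Int) := by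
  intro rs
  induction rs with
  | nil =>
    intro acc hlen
    simp only [List.foldl_nil, List.filter_nil, List.length_nil]
    exact ⟨hlen, fun j _ => by ring⟩
  | cons row t ih =>
    intro acc hlen
    simp only [List.foldl_cons]
    obtain ⟨rlen, rget⟩ := pv_cnt_row row w acc (by omega)
    obtain ⟨ilen, iget⟩ := ih _ (by rw [rlen]; exact hlen)
    refine ⟨ilen, fun j hj => ?_⟩
    rw [iget j hj, rget j, List.filter_cons]
    by_cases h5 : PySem.List.pyGetD row (j : Int) 0 = 5
    · rw [if_pos ⟨hj, h5⟩]
      have hb : (PySem.List.pyGetD row (j : Int) 0 == 5) = true := beq_iff_eq.2 h5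
      simp only [hb, if_true, List.length_cons]
      push_cast; ring
    · rw [if_neg (by tauto)]
      have hb : (PySem.List.pyGetD row (j : Int) 0 == 5) = false := by
        rw [beq_eq_false_iff_ne]; exact h5
      simp only [hb, Bool.false_eq_true, if_false]
      ring

theorem pv_counter_fold : ∀ (l : List Int) (d : PySem.Dict Int Int) (kk : Int),
    l.foldl (fun (dn : PySem.Dict Int Int × Int) c => (dn.1.insert c dn.2, dn.2 + 1)) (d, kk)
      = ((PySem.List.enumerate l (kk - 1)).foldl (fun d p => d.insert p.2 (p.1 + 1)) d,
         kk + (l.length : Int)) := by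
  intro l
  induction l with
  | nil => intro d kk; simp [PySem.List.enumerate]
  | cons c t ih =>
    intro d kk
    rw [PySem.List.enumerate_cons]
    simp only [List.foldl_cons]
    rw [ih (d.insert c kk) (kk + 1)]
    have h1 : kk - 1 + 1 = kk := by ring
    have h2 : kk + 1 - 1 = kk := by ring
    rw [h1, h2]
    simp only [List.length_cons, Prod.mk.injEq]
    exact ⟨by simp, by push_cast; ring⟩

theorem pv_bucket_fold (k : Int → Int) (m : Nat) :
    ∀ (cs : List Int) (b : List (List Int)), b.length = m → (∀ c ∈ cs, 0 ≤ k c ∧ k c < (m : Int)) →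
    ((cs.foldl (fun b c =>
        PySem.List.pySetD b (k c) (PySem.List.pyGetD b (k c) [] ++ [c])) b).length = m)
    ∧ ∀ L : Nat, L < m →
      PySem.List.pyGetD (cs.foldl (fun b c =>
          PySem.List.pySetD b (k c) (PySem.List.pyGetD b (k c) [] ++ [c])) b) (L : Int) []
        = PySem.List.pyGetD b (L : Int) [] ++ cs.filter (fun c => k c == (L : Int)) := by
  intro cs
  induction cs with
  | nil =>
    intro b hlen _
    simp only [List.foldl_nil, List.filter_nil, List.append_nil]
    exact ⟨hlen, fun _ _ => by simp⟩
  | cons c t ih =>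
    intro b hlen hbnd
    simp only [List.foldl_cons]
    obtain ⟨hk0, hkm⟩ := hbnd c (by simp)
    have hkc : (k c) = (((k c).toNat : Nat) : Int) := by omega
    have hstep_len : (PySem.List.pySetD b (k c) (PySem.List.pyGetD b (k c) [] ++ [c])).length = m := by
      rw [PySem.List.length_pySetD]; exact hlen
    obtain ⟨ilen, iget⟩ := ih _ hstep_len (fun x hx => hbnd x (by simp [hx]))
    refine ⟨ilen, fun L hL => ?_⟩
    rw [iget L hL]
    rw [List.filter_cons]
    rw [hkc, PySem.List.pyGetD_pySetD_natCast b _ L _ _ (by omega)]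
    by_cases hLk : L = (k c).toNat
    · rw [if_pos hLk]
      have hb : ((((k c).toNat : Nat) : Int) == (L : Int)) = true := by
        rw [beq_iff_eq]; omega
      simp only [hb, if_true]
      rw [show (((k c).toNat : Nat) : Int) = ((L : Nat) : Int) from by omega]
      simp
    · rw [if_neg hLk]
      have hb : ((((k c).toNat : Nat) : Int) == (L : Int)) = false := by
        rw [beq_eq_false_iff_ne]
        omega
      simp only [hb, Bool.false_eq_true, if_false]

theorem pv_ord_pairwise (grid : List (List Int)) :
    (pvOrd grid).Pairwise (fun x y =>
      -(pvCnt grid x) * (pvW grid : Int) + x < -(pvCnt grid y) * (pvW grid : Int) + y) := by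
  rw [pvOrd, List.flatMap_def]
  rw [List.pairwise_flatten]
  constructor
  · intro l hl
    rw [List.mem_map] at hl
    obtain ⟨L, _, rfl⟩ := hl
    have hpw : (PySem.List.pyRange 0 (pvW grid : Int) 1).Pairwise (· < ·) :=
      PySem.List.pairwise_lt_pyRange_one _ _
    refine List.Pairwise.imp_of_mem ?_ (List.Pairwise.filter _ hpw)
    intro x y hx hy hxy
    rw [List.mem_filter, PySem.List.mem_pyRange_one] at hx hy
    have hcx : pvCnt grid x = L := by simpa using hx.2
    have hcy : pvCnt grid y = L := by simpa using hy.2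
    rw [hcx, hcy]
    omega
  · rw [List.pairwise_map]
    have hpw : ((PySem.List.pyRange 1 ((grid.length : Int) + 1) 1).reverse).Pairwise
        (fun a b => b < a) := by
      rw [List.pairwise_reverse]
      exact PySem.List.pairwise_lt_pyRange_one _ _
    refine List.Pairwise.imp_of_mem ?_ hpw
    intro L1 L2 _ _ hlt x hx y hy
    rw [List.mem_filter, PySem.List.mem_pyRange_one] at hx hy
    have hcx : pvCnt grid x = L1 := by simpa using hx.2
    have hcy : pvCnt grid y = L2 := by simpa using hy.2
    rw [hcx, hcy]
    exact pv_key2_lt _ _ _ _ _ (by omega) hx.1.1 hx.1.2 hy.1.1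

theorem pv_ord_nodup (grid : List (List Int)) : (pvOrd grid).Nodup := by
  refine List.Pairwise.imp ?_ (pv_ord_pairwise grid)
  intro x y h heq
  subst heq
  exact lt_irrefl _ h

theorem pv_ord_mem (grid : List (List Int)) (c : Int) : c ∈ pvOrd grid ↔ c ∈ pvKA grid := by
  rw [pvOrd, List.mem_flatMap, pv_KA_mem]
  constructor
  · rintro ⟨L, hL, hc⟩
    rw [List.mem_reverse, PySem.List.mem_pyRange_one] at hL
    rw [List.mem_filter, PySem.List.mem_pyRange_one] at hc
    have : pvCnt grid c = L := by simpa using hc.2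
    exact ⟨hc.1.1, hc.1.2, by omega⟩
  · rintro ⟨h0, hW, hpos⟩
    refine ⟨pvCnt grid c, ?_, ?_⟩
    · rw [List.mem_reverse, PySem.List.mem_pyRange_one]
      have := pv_cnt_le grid c
      omega
    · rw [List.mem_filter, PySem.List.mem_pyRange_one]
      simp [h0, hW]

theorem pv_ord_eq_L (grid : List (List Int)) : pvOrd grid = pvL grid := by
  have hKApw : (pvKA grid).Pairwise (· < ·) :=
    List.Pairwise.filter _ (PySem.List.pairwise_lt_pyRange_one _ _)
  have h1 : pvL grid
      = PySem.List.sorted (pvKA grid)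
          (fun c => -(pvCnt grid c) * (pvW grid : Int) + c) false := by
    rw [pvL, PySem.List.sorted_eq_foldl_insertBy, PySem.List.sorted_eq_foldl_insertBy]
    apply pv_insertBy_fold_congr
    · intro x _ y hy
      simp at hy
    · refine List.Pairwise.imp_of_mem ?_ hKApw
      intro y x hy hx hyx
      rw [pv_KA_mem] at hx hy
      apply decide_eq_decide.mpr
      exact pv_key2_iff _ _ _ _ _ hyx hx.1 hx.2.1 hy.1
  have h2 : PySem.List.sorted (pvKA grid)
      (fun c => -(pvCnt grid c) * (pvW grid : Int) + c) false = pvOrd grid := by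
    apply PySem.List.sorted_eq_of_perm_of_pairwise_lt
    · exact (List.perm_ext_iff_of_nodup (pv_ord_nodup grid) (pv_KA_nodup grid)).2
        (pv_ord_mem grid)
    · exact pv_ord_pairwise grid
  rw [h1, h2]

theorem pv_beq_decide (a b : Int) : (a == b) = decide (a = b) := by
  by_cases h : a = b <;> simp [h]

theorem pv_getD_replicate0 (n j : Nat) :
    PySem.List.pyGetD (List.replicate n (0 : Int)) ((j : Nat) : Int) 0 = 0 := by
  rw [PySem.List.pyGetD_natCast]
  by_cases h : j < n
  · simp [List.getD_eq_getElem?_getD, h]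
  · simp [List.getD_eq_getElem?_getD, h]

theorem pv_B_eq (grid : List (List Int)) : solve_08ed6ac7_alt grid = pvOut grid := by
  simp only [solve_08ed6ac7_alt]
  rw [show (PySem.List.pyGetD grid 0 []).length = pvW grid from rfl]
  rw [Int.toNat_natCast]
  rw [show ((grid.length : Int) + 1).toNat = grid.length + 1 from by omega]
  set CNT := grid.foldl (fun cnt row =>
      (PySem.List.pyRange 0 ((pvW grid : Nat) : Int) 1).foldl (fun cnt c =>
        if PySem.List.pyGetD row c 0 == 5 then
          PySem.List.pySetD cnt c (PySem.List.pyGetD cnt c 0 + 1)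
        else cnt) cnt) (List.replicate (pvW grid) (0 : Int)) with hCNT
  have hcget : ∀ c : Int, 0 ≤ c → c < ((pvW grid : Nat) : Int) →
      PySem.List.pyGetD CNT c 0 = pvCnt grid c := by
    intro c h0 hw
    obtain ⟨_, hget⟩ := pv_cnt_fold (pvW grid) grid (List.replicate (pvW grid) 0) (by simp)
    rw [hCNT]
    rw [show c = ((c.toNat : Nat) : Int) from by omega]
    rw [hget c.toNat (by omega), pv_getD_replicate0, pvCnt]
    ring
  set BK := (PySem.List.pyRange 0 ((pvW grid : Nat) : Int) 1).foldl (fun b c =>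
      PySem.List.pySetD b (PySem.List.pyGetD CNT c 0)
        (PySem.List.pyGetD b (PySem.List.pyGetD CNT c 0) [] ++ [c]))
      (List.replicate (grid.length + 1) ([] : List Int)) with hBK
  have hbucket : ∀ L ∈ (PySem.List.pyRange 1 ((grid.length : Int) + 1) 1).reverse,
      PySem.List.pyGetD BK L []
        = (PySem.List.pyRange 0 ((pvW grid : Nat) : Int) 1).filter
            (fun c => decide (pvCnt grid c = L)) := by
    intro L hL
    rw [List.mem_reverse, PySem.List.mem_pyRange_one] at hL
    obtain ⟨hbklen, hbkget⟩ := pv_bucket_fold (fun c => PySem.List.pyGetD CNT c 0)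
      (grid.length + 1)
      (PySem.List.pyRange 0 ((pvW grid : Nat) : Int) 1) (List.replicate (grid.length + 1) [])
      (by simp)
      (by intro c hc
          rw [PySem.List.mem_pyRange_one] at hc
          change 0 ≤ PySem.List.pyGetD CNT c 0 ∧
            PySem.List.pyGetD CNT c 0 < ((grid.length + 1 : Nat) : Int)
          rw [hcget c hc.1 hc.2]
          push_cast
          exact ⟨pv_cnt_nonneg grid c, by have := pv_cnt_le grid c; omega⟩)
    rw [hBK, show L = ((L.toNat : Nat) : Int) from by omega, hbkget L.toNat (by omega)]
    rw [show PySem.List.pyGetD (List.replicate (grid.length + 1) ([] : List Int))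
        ((L.toNat : Nat) : Int) [] = ([] : List Int) from by
      rw [PySem.List.pyGetD_natCast]
      by_cases h : L.toNat < grid.length + 1
      · simp [List.getD_eq_getElem?_getD, h]
      · simp [List.getD_eq_getElem?_getD, h]]
    rw [List.nil_append]
    apply List.filter_congr
    intro c hc
    rw [PySem.List.mem_pyRange_one] at hc
    rw [hcget c hc.1 hc.2]
    exact pv_beq_decide _ _
  rw [PySem.List.foldl_congr_mem ((PySem.List.pyRange 1 ((grid.length : Int) + 1) 1).reverse)
      (fun (dn : PySem.Dict Int Int × Int) L =>
        (PySem.List.pyGetD BK L []).foldl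
          (fun (dn : PySem.Dict Int Int × Int) c => (dn.1.insert c dn.2, dn.2 + 1)) dn)
      (fun (dn : PySem.Dict Int Int × Int) L =>
        ((PySem.List.pyRange 0 ((pvW grid : Nat) : Int) 1).filter
            (fun c => decide (pvCnt grid c = L))).foldl
          (fun (dn : PySem.Dict Int Int × Int) c => (dn.1.insert c dn.2, dn.2 + 1)) dn)
      (PySem.Dict.empty, 1)
      (fun acc L hL => by simp only [hbucket L hL])]
  rw [← List.foldl_flatMap]
  rw [show ((PySem.List.pyRange 1 ((grid.length : Int) + 1) 1).reverse).flatMap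
      (fun L => (PySem.List.pyRange 0 ((pvW grid : Nat) : Int) 1).filter
        (fun c => decide (pvCnt grid c = L))) = pvOrd grid from rfl]
  rw [pv_ord_eq_L grid, pv_counter_fold (pvL grid) PySem.Dict.empty 1]
  rw [show (1 : Int) - 1 = 0 from by norm_num]
  rw [pvOut]
  apply List.ext_getElem (by simp)
  intro r h1 h2
  rw [List.getElem_map, List.getElem_mapIdx]
  apply List.ext_getElem (by simp [PySem.List.length_enumerate])
  intro c h3 h4
  rw [List.getElem_map, List.getElem_mapIdx]
  rw [PySem.List.getElem_enumerate _ _ c (by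
    rw [PySem.List.length_enumerate]
    simpa using h4)]
  have hrl : r < grid.length := by simpa using h1
  have hcl : c < (grid[r]'hrl).length := by simpa using h4
  have hcell : pvCell grid (r : Int) (c : Int) = (grid[r]'hrl)[c]'hcl := by
    rw [pvCell,
        show PySem.List.pyGetD grid ((r : Nat) : Int) [] = grid[r]'hrl from by
          rw [PySem.List.pyGetD_natCast]; exact List.getD_eq_getElem _ _ hrl,
        PySem.List.pyGetD_natCast]
    exact List.getD_eq_getElem _ _ hcl
  by_cases h5 : (grid[r]'hrl)[c]'hcl = (5 : Int)
  · by_cases hm : ((c : Nat) : Int) ∈ pvL grid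
    · have hget := pv_cm_get? (pvL grid) 0 PySem.Dict.empty ((c : Nat) : Int)
        (pv_L_nodup grid) hm
      have hcont : ((PySem.List.enumerate (pvL grid) 0).foldl
          (fun d p => d.insert p.2 (p.1 + 1)) PySem.Dict.empty).contains ((c : Nat) : Int)
          = true := by
        rw [PySem.Dict.contains_eq_isSome_get?, hget]
        rfl
      rw [if_pos (by
        simp only [zero_add]
        rw [hcont]
        simp [h5])]
      rw [if_pos ⟨by rw [hcell]; exact h5, hm⟩]
      simp only [zero_add]
      rw [PySem.Dict.getD_eq_get?_getD, hget]
      simp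
      ring
    · have hget : ((PySem.List.enumerate (pvL grid) 0).foldl
          (fun d p => d.insert p.2 (p.1 + 1)) PySem.Dict.empty).get? ((c : Nat) : Int)
          = none := by
        rw [pv_cm_skip (pvL grid) 0 PySem.Dict.empty _ hm]
        exact PySem.Dict.get?_empty _
      have hcont : ((PySem.List.enumerate (pvL grid) 0).foldl
          (fun d p => d.insert p.2 (p.1 + 1)) PySem.Dict.empty).contains ((c : Nat) : Int)
          = false := by
        rw [PySem.Dict.contains_eq_isSome_get?, hget]
        rfl
      rw [if_neg (by
        simp only [zero_add]
        rw [hcont]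
        simp)]
      rw [if_neg (by rw [hcell]; tauto)]
  · rw [if_neg (by simp [h5])]
    rw [if_neg (by rw [hcell]; tauto)]

-- ===== VERDICT (by name: the statement is the Claim_ definition above) =====
theorem solve_08ed6ac7_spec : Claim_equal_solve_08ed6ac7 := by
  intro grid _ hpre
  unfold Spec_solve_08ed6ac7
  rw [pv_A_eq, pv_B_eq]
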